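-- pv_equiv track=rewrite | github.com/NeoMittt/HR-AI-manager | ai_client.py | _sort_models
-- ===== SOURCE A (Python) =====
-- DEFAULT_WORKING_FREE_MODELS = [
--     "nvidia/nemotron-3-super-120b-a12b:free",
--     "openrouter/free",
--     "google/gemma-3-12b-it:free",
--     "google/gemma-3-4b-it:free",
-- ]
--
-- def _sort_models(models: list[str]) -> list[str]:
--     preferred_order = {
--         model_name: index
--         for index, model_name in enumerate(DEFAULT_WORKING_FREE_MODELS)
--     }
--     return sorted(
--         set(models),
--         key=lambda model_name: (
--             preferred_order.get(model_name, 10_000),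
--             model_name,
--         ),
--     )
-- ===== SOURCE B (Python) =====
-- DEFAULT_WORKING_FREE_MODELS = [
--     "nvidia/nemotron-3-super-120b-a12b:free",
--     "openrouter/free",
--     "google/gemma-3-12b-it:free",
--     "google/gemma-3-4b-it:free",
-- ]
--
-- def _sort_models(models: list[str]) -> list[str]:
--     present = set(models)
--     preferred = [m for m in DEFAULT_WORKING_FREE_MODELS if m in present]
--     rest = sorted(m for m in present if m not in DEFAULT_WORKING_FREE_MODELS)
--     return preferred + rest
-- ===== Notes on version B (the rewrite author's own statement) =====
-- stated objective: simpler
-- what changed: Instead of one sort of the whole deduplicated set under a sentinel (index, name) tuple key, B walks the 4-element reference list once to collect the preferred models in its order and sorts only the non-preferred remainder alphabetically with no key function, concatenating the two buckets; avoiding the per-comparison tuple-key construction makes it measurably faster.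
import Mathlib
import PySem

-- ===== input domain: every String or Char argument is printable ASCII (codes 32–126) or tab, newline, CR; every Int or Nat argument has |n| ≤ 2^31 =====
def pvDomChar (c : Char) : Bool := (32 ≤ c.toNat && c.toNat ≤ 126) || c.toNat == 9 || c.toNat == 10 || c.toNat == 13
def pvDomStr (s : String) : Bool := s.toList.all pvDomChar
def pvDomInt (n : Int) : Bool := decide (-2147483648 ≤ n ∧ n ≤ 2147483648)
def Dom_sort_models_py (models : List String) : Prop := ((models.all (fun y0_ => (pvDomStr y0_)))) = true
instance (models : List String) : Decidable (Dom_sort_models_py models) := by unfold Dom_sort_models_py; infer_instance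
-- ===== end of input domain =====

-- B replaces A's sentinel-keyed sort of the whole set by two plainer passes: walk the
-- reference list in order for the preferred bucket, sort only the remainder (objective: simpler).

-- module-level constant DEFAULT_WORKING_FREE_MODELS (shared context of A and B)
def pvDefaults : List String :=
  ["nvidia/nemotron-3-super-120b-a12b:free",
   "openrouter/free",
   "google/gemma-3-12b-it:free",
   "google/gemma-3-4b-it:free"]

-- ===== PORT A =====
def sort_models_py (models : List String) : List String :=
  let preferred_order : PySem.Dict String Int :=
    (PySem.List.enumerate pvDefaults 0).foldl
      (fun d p => d.insert p.2 p.1) PySem.Dict.empty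
  PySem.List.sorted2 (PySem.Set.ofList models)
    (fun m => preferred_order.getD m 10000) (fun m => m) false

-- ===== PORT B =====
def sort_models_py_alt (models : List String) : List String :=
  let present : PySem.Set String := PySem.Set.ofList models
  let preferred := pvDefaults.filter (fun m => PySem.Set.contains present m)
  let rest := PySem.List.sorted (present.filter (fun m => !(pvDefaults.contains m)))
      (fun x => x) false
  preferred ++ rest

-- ===== PRECONDITION & SPEC =====
def Spec_sort_models_py (models : List String) (out : List String) : Prop := out = sort_models_py_alt models
instance (models : List String) (out : List String) : Decidable (Spec_sort_models_py models out) := by unfold Spec_sort_models_py; infer_instance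

-- ===== CLAIM (what is proved, stated in full; the proofs are below) =====
def Claim_equal_sort_models_py : Prop := ∀ (models : List String), Dom_sort_models_py models → Spec_sort_models_py models (sort_models_py models)

-- ===== LEMMAS AND PROOFS =====

-- A's key, named for the proofs
def pvKeyA (m : String) : Int :=
  ((PySem.List.enumerate pvDefaults 0).foldl
      (fun d p => d.insert p.2 p.1) (PySem.Dict.empty : PySem.Dict String Int)).getD m 10000

-- A's tuple key as a lexicographic value
def pvKey (m : String) : Lex (Int × String) := toLex (pvKeyA m, m)

theorem pvKeyA_of_not_mem (m : String) (h : m ∉ pvDefaults) : pvKeyA m = 10000 := by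
  simp only [pvDefaults, List.mem_cons, List.not_mem_nil, or_false, not_or] at h
  obtain ⟨h1, h2, h3, h4⟩ := h
  simp [pvKeyA, pvDefaults, PySem.List.enumerate, PySem.Dict.getD, PySem.Dict.insert,
        PySem.Dict.empty, PySem.Dict.get?, PySem.Dict.contains,
        beq_iff_eq, Ne.symm h1, Ne.symm h2, Ne.symm h3, Ne.symm h4]

theorem pvKeyA_of_mem : ∀ m ∈ pvDefaults, pvKeyA m < 10000 := by decide

theorem pvDefaults_pairwise : pvDefaults.Pairwise (fun a b => pvKeyA a < pvKeyA b) := by decide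

theorem pvDefaults_nodup : pvDefaults.Nodup := by decide

-- sorted2 with keys (k1, id) is sorted with the lexicographic key
theorem sorted2_eq_sorted_lex (xs : List String) (k1 : String → Int) :
    PySem.List.sorted2 xs k1 (fun x => x) false
      = PySem.List.sorted xs (fun x => toLex (k1 x, x)) false := by
  have hcmp : (fun (a b : String) => decide (k1 a < k1 b) || (!decide (k1 b < k1 a) && decide (a < b)))
      = fun a b => decide (toLex (k1 a, a) < toLex (k1 b, b)) := by
    funext a b
    simp only [Prod.Lex.toLex_lt_toLex]
    by_cases h1 : k1 a < k1 b
    · simp [h1, not_lt.2 (le_of_lt h1)]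
    · by_cases h2 : k1 b < k1 a
      · simp [h1, h2, (ne_of_lt h2).symm]
      · have he : k1 a = k1 b := le_antisymm (not_lt.1 h2) (not_lt.1 h1)
        simp [he]
  show xs.foldl (fun acc x => PySem.List.insertBy
      (fun a b => decide (k1 a < k1 b) || (!decide (k1 b < k1 a) && decide (a < b))) x acc) []
    = xs.foldl (fun acc x => PySem.List.insertBy
      (fun a b => decide (toLex (k1 a, a) < toLex (k1 b, b))) x acc) []
  rw [hcmp]

theorem sort_models_py_eq (models : List String) :
    sort_models_py models = sort_models_py_alt models := by
  show PySem.List.sorted2 (PySem.Set.ofList models) pvKeyA (fun m => m) false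
      = pvDefaults.filter (fun m => PySem.Set.contains (PySem.Set.ofList models) m)
        ++ PySem.List.sorted ((PySem.Set.ofList models).filter
            (fun m => !(pvDefaults.contains m))) (fun x => x) false
  rw [sorted2_eq_sorted_lex]
  set s := PySem.Set.ofList models with hs
  set pref := pvDefaults.filter (fun m => PySem.Set.contains s m) with hpref
  set rest := PySem.List.sorted (s.filter (fun m => !(pvDefaults.contains m))) (fun x => x) false
    with hrest
  have hnodup_s : s.Nodup := PySem.Set.nodup_ofList models
  have hp2 : rest.Perm (s.filter (fun m => !(pvDefaults.contains m))) :=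
    PySem.List.sorted_perm _ _ _
  have h10k : ∀ m ∈ rest, pvKeyA m = 10000 := by
    intro m hm
    have hmem := (List.mem_filter.1 ((PySem.List.mem_sorted _ _ _ m).1 hm)).2
    refine pvKeyA_of_not_mem m ?_
    simpa using hmem
  have hp1 : pref.Perm (s.filter (fun m => pvDefaults.contains m)) := by
    refine (List.perm_ext_iff_of_nodup (pvDefaults_nodup.filter _) (hnodup_s.filter _)).2 ?_
    intro a
    simp only [List.mem_filter, PySem.Set.contains, List.contains_iff_mem]
    exact and_comm
  have hperm : (pref ++ rest).Perm s :=
    (hp1.append hp2).trans (List.filter_append_perm (fun m => pvDefaults.contains m) s)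
  refine PySem.List.sorted_eq_of_perm_of_pairwise_lt _ _ _ hperm ?_
  rw [List.pairwise_append]
  refine ⟨?_, ?_, ?_⟩
  · exact (pvDefaults_pairwise.filter _).imp
      (fun h => Prod.Lex.toLex_lt_toLex.2 (Or.inl h))
  · have h1 : rest.Pairwise (fun a b : String => (fun x => x) a ≤ (fun x => x) b) :=
      PySem.List.sorted_pairwise _ _
    have h2 : rest.Pairwise (· ≠ ·) := hp2.symm.nodup (hnodup_s.filter _)
    refine (h1.and h2).imp_of_mem ?_
    intro a b ha hb hab
    exact Prod.Lex.toLex_lt_toLex.2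
      (Or.inr ⟨by rw [h10k a ha, h10k b hb], lt_of_le_of_ne hab.1 hab.2⟩)
  · intro a ha b hb
    have haD : a ∈ pvDefaults := (List.mem_filter.1 ha).1
    refine Prod.Lex.toLex_lt_toLex.2 (Or.inl ?_)
    rw [h10k b hb]
    exact pvKeyA_of_mem a haD

-- ===== VERDICT (by name: the statement is the Claim_ definition above) =====
theorem sort_models_py_spec : Claim_equal_sort_models_py := by
  intro models _
  unfold Spec_sort_models_py
  exact sort_models_py_eq models
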